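-- pv_equiv track=rewrite | github.com/sheldon123z/Rural-Low-Voltage-Detection | code/models/HybridTimesNet.py | _auto_generate_periods
-- ===== SOURCE A (Python) =====
-- from typing import List, Optional, Tuple
--
-- def _auto_generate_periods(seq_len: int) -> List[int]:
--     max_period = seq_len // 2
--     periods = []
--     p = 5
--     while p <= max_period:
--         periods.append(p)
--         p = int(p * 2)
--     if not periods:
--         periods = [2, 4]
--     return periods
-- ===== SOURCE B (Python) =====
-- from typing import List, Optional, Tuple
--
-- def _auto_generate_periods(seq_len: int) -> List[int]:
--     max_period = seq_len // 2
--     m = max_period // 5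
--     if m < 1:
--         return [2, 4]
--     return [5 * 2 ** k for k in range(m.bit_length())]
-- ===== Notes on version B (the rewrite author's own statement) =====
-- stated objective: simpler
-- what changed: Replaces the doubling while-loop by a closed form: the term count is (seq_len//2//5).bit_length(), so the list is a direct comprehension [5*2**k for k in range(...)] with no loop state.
import Mathlib
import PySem

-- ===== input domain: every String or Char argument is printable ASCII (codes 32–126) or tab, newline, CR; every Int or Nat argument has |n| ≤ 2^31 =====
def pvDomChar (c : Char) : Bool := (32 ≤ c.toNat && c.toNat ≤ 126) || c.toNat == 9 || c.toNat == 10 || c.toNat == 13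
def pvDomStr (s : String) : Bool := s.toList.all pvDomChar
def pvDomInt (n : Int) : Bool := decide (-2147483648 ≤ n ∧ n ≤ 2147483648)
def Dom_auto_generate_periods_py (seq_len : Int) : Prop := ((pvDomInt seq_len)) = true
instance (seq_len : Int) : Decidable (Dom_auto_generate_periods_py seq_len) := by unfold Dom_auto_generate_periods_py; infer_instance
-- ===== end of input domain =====

-- B replaces A's doubling while-loop by a closed form: the number of terms is
-- (max_period // 5).bit_length(), so the list is built directly (objective: simpler).

-- ===== PORT A =====
-- the 'while p <= max_period' loop of A; hp (0 < p) only justifies termination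
def agpLoop (maxp p : Int) (acc : List Int) (hp : 0 < p) : List Int :=
  if h : p ≤ maxp then agpLoop maxp (p * 2) (acc ++ [p]) (by omega) else acc
termination_by (maxp - p + 1).toNat
decreasing_by simp_wf; omega

def auto_generate_periods_py (seq_len : Int) : List Int :=
  let max_period := PySem.Int.floordiv seq_len 2
  let periods := agpLoop max_period 5 [] (by norm_num)
  if periods = [] then [2, 4] else periods

-- ===== PORT B =====
def auto_generate_periods_py_alt (seq_len : Int) : List Int :=
  let max_period := PySem.Int.floordiv seq_len 2
  let m := PySem.Int.floordiv max_period 5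
  if m < 1 then [2, 4]
  else (List.range (PySem.Int.bitLength m)).map (fun k => 5 * 2 ^ k)

-- ===== PRECONDITION & SPEC =====
def Spec_auto_generate_periods_py (seq_len : Int) (out : List Int) : Prop := out = auto_generate_periods_py_alt seq_len
instance (seq_len : Int) (out : List Int) : Decidable (Spec_auto_generate_periods_py seq_len out) := by unfold Spec_auto_generate_periods_py; infer_instance

-- ===== CLAIM (what is proved, stated in full; the proofs are below) =====
def Claim_equal_auto_generate_periods_py : Prop := ∀ (seq_len : Int), Dom_auto_generate_periods_py seq_len → Spec_auto_generate_periods_py seq_len (auto_generate_periods_py seq_len)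

-- ===== LEMMAS AND PROOFS =====

-- closed form of the doubling loop: it appends p·2^k for every k with floordiv maxp p ≥ 2^k,
-- i.e. for k < bitLength (floordiv maxp p) (empty when floordiv maxp p ≤ 0)
lemma agpLoop_eq (maxp : Int) : ∀ (p : Int) (acc : List Int) (hp : 0 < p),
    agpLoop maxp p acc hp =
      acc ++ (if PySem.Int.floordiv maxp p < 1 then []
              else (List.range (PySem.Int.bitLength (PySem.Int.floordiv maxp p))).map
                     (fun k => p * 2 ^ k)) := by
  intro p acc hp
  induction p, acc, hp using agpLoop.induct maxp with
  | case1 p acc hp hle ih =>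
    rw [agpLoop, dif_pos hle, ih]
    have hq1 : (1 : Int) ≤ PySem.Int.floordiv maxp p := by
      rw [PySem.Int.le_floordiv_iff_mul_le hp]; omega
    have hdiv : PySem.Int.floordiv maxp (p * 2) =
        PySem.Int.floordiv (PySem.Int.floordiv maxp p) 2 := by
      rw [PySem.Int.floordiv_eq_ediv_of_pos hp, PySem.Int.floordiv_eq_ediv_of_pos (by omega),
          PySem.Int.floordiv_eq_ediv_of_pos (by omega), Int.ediv_ediv_of_nonneg (le_of_lt hp)]
    set q := PySem.Int.floordiv maxp p with hqdef
    have hbl : PySem.Int.bitLength q = PySem.Int.bitLength (PySem.Int.floordiv q 2) + 1 :=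
      PySem.Int.bitLength_of_pos (by omega)
    have hq2 : 0 ≤ PySem.Int.floordiv q 2 := by
      rw [PySem.Int.le_floordiv_iff_mul_le (by norm_num)]; omega
    rw [hdiv, if_neg (show ¬ q < 1 by omega), hbl]
    by_cases h2 : PySem.Int.floordiv q 2 < 1
    · have h0 : PySem.Int.floordiv q 2 = 0 := by omega
      rw [if_pos h2, h0]
      simp [PySem.Int.bitLength_zero, List.range_succ]
    · rw [if_neg h2, List.range_succ_eq_map]
      simp only [List.map_cons, List.map_map, pow_zero, mul_one, List.append_assoc,
        List.singleton_append]
      congr 2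
      apply List.map_congr_left
      intro k _
      simp only [Function.comp_apply, pow_succ]
      ring
  | case2 p acc hp hle =>
    rw [agpLoop, dif_neg hle, if_pos, List.append_nil]
    rw [PySem.Int.floordiv_lt_iff_lt_mul hp]; omega

theorem auto_generate_periods_py_spec : Claim_equal_auto_generate_periods_py := by
  intro seq_len _
  unfold Spec_auto_generate_periods_py auto_generate_periods_py auto_generate_periods_py_alt
  simp only []
  rw [agpLoop_eq]
  set m := PySem.Int.floordiv (PySem.Int.floordiv seq_len 2) 5 with hm
  by_cases h : m < 1
  · rw [if_pos h, if_pos h]; simp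
  · rw [if_neg h, if_neg h, List.nil_append]
    have hbl : PySem.Int.bitLength m = PySem.Int.bitLength (PySem.Int.floordiv m 2) + 1 :=
      PySem.Int.bitLength_of_pos (by omega)
    rw [if_neg]
    intro hcon
    rw [List.map_eq_nil_iff, List.range_eq_nil, hbl] at hcon
    omega

-- ===== VERDICT (by name: the statement is the Claim_ definition above) =====
-- (theorem above; layout note: verdict theorem is the single theorem auto_generate_periods_py_spec)
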